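-- pv_equiv track=rewrite | github.com/MoeenNehzati/video | scripts/arrange_score.py | bucket_pitch
-- ===== SOURCE A (Python) =====
-- def bucket_pitch(events: list[dict[str, int]], start: int, end: int, mode: str) -> int | None:
--     bucket = [event["midi"] for event in events if start <= event["onset"] < end]
--     if not bucket:
--         bucket = [event["midi"] for event in events if event["onset"] >= start]
--     if not bucket:
--         bucket = [event["midi"] for event in events if event["onset"] < start]
--     if not bucket:
--         return None
--     selector = max if mode == "high" else min
--     return selector(bucket)
-- ===== SOURCE B (Python) =====
-- def bucket_pitch(events, start, end, mode):
--     sel = max if mode == "high" else min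
--     in_range = at_or_after = before = None
--     for event in events:
--         onset = event["onset"]
--         midi = event["midi"]
--         if start <= onset < end:
--             in_range = midi if in_range is None else sel(in_range, midi)
--         if onset >= start:
--             at_or_after = midi if at_or_after is None else sel(at_or_after, midi)
--         if onset < start:
--             before = midi if before is None else sel(before, midi)
--     if in_range is not None:
--         return in_range
--     if at_or_after is not None:
--         return at_or_after
--     return before
-- ===== Notes on version B (the rewrite author's own statement) =====
-- stated objective: alternative
-- what changed: Replaced A's up-to-three list comprehensions plus a max/min reduction over a materialized bucket by a single pass over events that maintains three optional running extrema (in-range, onset>=start, onset<start) and returns the first non-None in that priority order.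
-- outside the precondition, e.g. on bucket_pitch([{'onset': 0, 'midi': 5}, {'onset': 100}], 0, 10, 'high'): A returns 5, B raises KeyError
import Mathlib
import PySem

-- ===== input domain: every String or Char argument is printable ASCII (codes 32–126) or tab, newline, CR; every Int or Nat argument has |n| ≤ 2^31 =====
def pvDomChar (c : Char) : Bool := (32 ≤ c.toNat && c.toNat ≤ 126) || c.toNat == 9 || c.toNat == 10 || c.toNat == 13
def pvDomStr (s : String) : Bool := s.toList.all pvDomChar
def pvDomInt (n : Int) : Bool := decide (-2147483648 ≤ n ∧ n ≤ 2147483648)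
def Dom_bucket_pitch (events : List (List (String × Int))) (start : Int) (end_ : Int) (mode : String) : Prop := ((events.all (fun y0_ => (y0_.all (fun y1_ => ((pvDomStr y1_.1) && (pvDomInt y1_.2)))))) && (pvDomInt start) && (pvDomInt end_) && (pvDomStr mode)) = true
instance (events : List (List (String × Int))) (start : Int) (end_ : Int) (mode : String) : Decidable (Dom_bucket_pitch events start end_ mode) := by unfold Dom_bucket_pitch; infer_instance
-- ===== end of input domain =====

-- B replaces A's three list comprehensions + max/min reduction by one pass over events
-- maintaining three optional running extrema with first-non-None priority (objective: alternative).


-- shared dict-lookup helpers: event["onset"] / event["midi"] (first match; default never used under Pre_)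
def pvOnset (ev : List (String × Int)) : Int := PySem.Dict.getD (PySem.Dict.mk ev) "onset" 0
def pvMidi (ev : List (String × Int)) : Int := PySem.Dict.getD (PySem.Dict.mk ev) "midi" 0

-- ===== PORT A =====
def bucket_pitch (events : List (List (String × Int))) (start : Int) (end_ : Int) (mode : String) : Option Int :=
  let b1 := (events.filter (fun ev => decide (start ≤ pvOnset ev ∧ pvOnset ev < end_))).map pvMidi
  let b2 := if b1.isEmpty then (events.filter (fun ev => decide (pvOnset ev ≥ start))).map pvMidi else b1
  let b3 := if b2.isEmpty then (events.filter (fun ev => decide (pvOnset ev < start))).map pvMidi else b2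
  if b3.isEmpty then none
  else if mode = "high" then PySem.List.max? b3 (fun x => x) else PySem.List.min? b3 (fun x => x)

-- ===== PORT B =====
-- sel applied to an optional running extremum: None ↦ first value, else max/min
def pvSel (high : Bool) (acc : Option Int) (x : Int) : Option Int :=
  match acc with
  | none => some x
  | some a => some (if high then max a x else min a x)

def bucket_pitch_alt (events : List (List (String × Int))) (start : Int) (end_ : Int) (mode : String) : Option Int :=
  let high : Bool := mode == "high"
  let st := events.foldl
    (fun (s : Option Int × Option Int × Option Int) ev =>
      let o := pvOnset ev
      let m := pvMidi ev
      (if start ≤ o ∧ o < end_ then pvSel high s.1 m else s.1,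
       if o ≥ start then pvSel high s.2.1 m else s.2.1,
       if o < start then pvSel high s.2.2 m else s.2.2))
    (none, none, none)
  match st.1 with
  | some v => some v
  | none =>
    match st.2.1 with
    | some v => some v
    | none => st.2.2

-- ===== PRECONDITION & SPEC =====
-- Pre_ requires every event to carry both keys "onset" and "midi". A raises KeyError when any
-- event lacks "onset"; it still RETURNS when an event lacking only "midi" is never selected into
-- the bucket, while B reads every event's "midi" and raises there — those inputs are excluded
-- (see the cite in claim.json).
def Pre_bucket_pitch (events : List (List (String × Int))) (start : Int) (end_ : Int) (mode : String) : Prop :=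
  ∀ ev ∈ events, "onset" ∈ ev.map Prod.fst ∧ "midi" ∈ ev.map Prod.fst
instance (events : List (List (String × Int))) (start : Int) (end_ : Int) (mode : String) : Decidable (Pre_bucket_pitch events start end_ mode) := by unfold Pre_bucket_pitch; infer_instance

def pvWitness_bucket_pitch : (List (List (String × Int))) × Int × Int × String :=
  ([[("onset", 2), ("midi", 60)], [("onset", 7), ("midi", 64)]], 0, 5, "high")

def Spec_bucket_pitch (events : List (List (String × Int))) (start : Int) (end_ : Int) (mode : String) (out : Option Int) : Prop := out = bucket_pitch_alt events start end_ mode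
instance (events : List (List (String × Int))) (start : Int) (end_ : Int) (mode : String) (out : Option Int) : Decidable (Spec_bucket_pitch events start end_ mode out) := by unfold Spec_bucket_pitch; infer_instance

-- ===== CLAIM (what is proved, stated in full; the proofs are below) =====
def Claim_equal_bucket_pitch : Prop := ∀ (events : List (List (String × Int))) (start : Int) (end_ : Int) (mode : String), Dom_bucket_pitch events start end_ mode → Pre_bucket_pitch events start end_ mode → Spec_bucket_pitch events start end_ mode (bucket_pitch events start end_ mode)

-- ===== LEMMAS AND PROOFS =====

-- one component of B's fold
def pvRun (high : Bool) (p : List (String × Int) → Bool) (events : List (List (String × Int))) (acc : Option Int) : Option Int :=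
  events.foldl (fun a ev => if p ev then pvSel high a (pvMidi ev) else a) acc

lemma pvFold_split (high : Bool) (start end_ : Int) (events : List (List (String × Int)))
    (s : Option Int × Option Int × Option Int) :
    events.foldl
      (fun (s : Option Int × Option Int × Option Int) ev =>
        let o := pvOnset ev
        let m := pvMidi ev
        (if start ≤ o ∧ o < end_ then pvSel high s.1 m else s.1,
         if o ≥ start then pvSel high s.2.1 m else s.2.1,
         if o < start then pvSel high s.2.2 m else s.2.2)) s
    = (pvRun high (fun ev => decide (start ≤ pvOnset ev ∧ pvOnset ev < end_)) events s.1,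
       pvRun high (fun ev => decide (pvOnset ev ≥ start)) events s.2.1,
       pvRun high (fun ev => decide (pvOnset ev < start)) events s.2.2) := by
  induction events generalizing s with
  | nil => simp [pvRun]
  | cons ev t ih =>
      simp only [List.foldl_cons, ih]
      simp [pvRun]

lemma pvRun_eq_foldl (high : Bool) (p : List (String × Int) → Bool)
    (events : List (List (String × Int))) (acc : Option Int) :
    pvRun high p events acc = ((events.filter p).map pvMidi).foldl (pvSel high) acc := by
  induction events generalizing acc with
  | nil => rfl
  | cons ev t ih =>
      by_cases h : p ev = true
      · simp [pvRun, h, List.foldl_cons] at ih ⊢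
        exact ih _
      · simp only [Bool.not_eq_true] at h
        simp [pvRun, h] at ih ⊢
        exact ih _

lemma pvFoldl_sel_some_max (t : List Int) (a : Int) :
    t.foldl (pvSel true) (some a) = some (t.foldl max a) := by
  induction t generalizing a with
  | nil => rfl
  | cons x t ih => simp [pvSel, ih]

lemma pvFoldl_sel_some_min (t : List Int) (a : Int) :
    t.foldl (pvSel false) (some a) = some (t.foldl min a) := by
  induction t generalizing a with
  | nil => rfl
  | cons x t ih => simp [pvSel, ih]

-- B's running extremum over a list, started from None, is exactly Python's max/min of that list
lemma pvFoldl_sel_none (high : Bool) (xs : List Int) :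
    xs.foldl (pvSel high) none
      = (if high then PySem.List.max? xs (fun x => x) else PySem.List.min? xs (fun x => x)) := by
  cases xs with
  | nil => cases high <;> rfl
  | cons x t =>
      cases high with
      | true =>
          simp only [List.foldl_cons, pvSel, if_true]
          rw [PySem.List.max?_id_cons]
          exact pvFoldl_sel_some_max t x
      | false =>
          simp only [List.foldl_cons, pvSel]
          rw [PySem.List.min?_id_cons]
          exact pvFoldl_sel_some_min t x

-- A's rebinding chain 'bucket = … if not bucket …' followed by one selection equals
-- B's first-non-None priority over the three selections, for any selector that is none exactly on []
lemma pvPriority (mm : List Int → Option Int) (hmm : ∀ xs, mm xs = none ↔ xs = [])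
    (b1 c2 c3 : List Int) :
    (if (if (if b1.isEmpty then c2 else b1).isEmpty then c3 else if b1.isEmpty then c2 else b1).isEmpty
       then none
       else mm (if (if b1.isEmpty then c2 else b1).isEmpty then c3 else if b1.isEmpty then c2 else b1))
    = (match mm b1 with
       | some v => some v
       | none => match mm c2 with
                 | some v => some v
                 | none => mm c3) := by
  cases hm1 : mm b1 with
  | some v =>
      have h1 : b1.isEmpty = false := by
        simp only [List.isEmpty_eq_false_iff]
        intro h; rw [(hmm b1).mpr h] at hm1; simp at hm1
      simp [h1, hm1]
  | none =>
      have h1 : b1 = [] := (hmm b1).mp hm1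
      subst h1
      cases hm2 : mm c2 with
      | some v =>
          have h2 : c2.isEmpty = false := by
            simp only [List.isEmpty_eq_false_iff]
            intro h; rw [(hmm c2).mpr h] at hm2; simp at hm2
          simp [h2, hm2]
      | none =>
          have h2 : c2 = [] := (hmm c2).mp hm2
          subst h2
          by_cases h3 : c3 = []
          · simp [h3, (hmm []).mpr rfl]
          · simp [List.isEmpty_eq_false_iff.mpr h3]

-- ===== VERDICT (by name: the statement is the Claim_ definition above) =====
theorem bucket_pitch_spec : Claim_equal_bucket_pitch := by
  intro events start end_ mode _ _
  unfold Spec_bucket_pitch bucket_pitch bucket_pitch_alt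
  dsimp only
  rw [pvFold_split]
  simp only [pvRun_eq_foldl, pvFoldl_sel_none]
  have hmode : ∀ xs : List Int,
      (if (mode == "high") = true then PySem.List.max? xs (fun x => x) else PySem.List.min? xs (fun x => x))
      = (if mode = "high" then PySem.List.max? xs (fun x => x) else PySem.List.min? xs (fun x => x)) := by
    intro xs; by_cases h : mode = "high" <;> simp [h]
  simp only [hmode]
  exact pvPriority
    (fun xs => if mode = "high" then PySem.List.max? xs (fun x => x) else PySem.List.min? xs (fun x => x))
    (fun xs => by
      by_cases h : mode = "high"
      · simp [h, PySem.List.max?_eq_none_iff]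
      · simp [h, PySem.List.min?_eq_none_iff])
    _ _ _
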